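-- pv_equiv track=rewrite | github.com/pypi-data/pypi-mirror-210 | packages/encode-decode-vbm/encode_decode_vbm-0.1.1-py3-none-any.whl/encode_decode_vbm/funcs/sha_funcs.py | initializer
-- ===== SOURCE A (Python) =====
-- def fillZeros(bits, length=8, endian='LE'):
--     l = len(bits)
--     if endian == 'LE':
--         for i in range(l, length):
--             bits.append(0)
--     else:
--         while l < length:
--             bits.insert(0, 0)
--             l = len(bits)
--
--     return bits
--
-- def initializer(vals):
--     binaries = [bin(int(v, 16))[2:] for v in vals]
--
--     words = []
--     for binary in binaries:
--         word = []
--         for b in binary: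
--             word.append(int(b))
--         words.append(fillZeros(word, 32, 'BE'))
--
--     return words
-- ===== SOURCE B (Python) =====
-- def initializer(vals):
--     # single pass: format() zero-pads to a minimum of 32 binary digits directly
--     return [[int(c) for c in format(int(v, 16), '032b')] for v in vals]
-- ===== Notes on version B (the rewrite author's own statement) =====
-- stated objective: simpler
-- what changed: Replaces A's three-stage pipeline (bin() string slice, explicit per-char loop, fillZeros helper that repeatedly inserts 0 at the front) with a single comprehension that zero-pads via format(int(v,16),'032b') and maps each digit char to int.
import Mathlib
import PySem

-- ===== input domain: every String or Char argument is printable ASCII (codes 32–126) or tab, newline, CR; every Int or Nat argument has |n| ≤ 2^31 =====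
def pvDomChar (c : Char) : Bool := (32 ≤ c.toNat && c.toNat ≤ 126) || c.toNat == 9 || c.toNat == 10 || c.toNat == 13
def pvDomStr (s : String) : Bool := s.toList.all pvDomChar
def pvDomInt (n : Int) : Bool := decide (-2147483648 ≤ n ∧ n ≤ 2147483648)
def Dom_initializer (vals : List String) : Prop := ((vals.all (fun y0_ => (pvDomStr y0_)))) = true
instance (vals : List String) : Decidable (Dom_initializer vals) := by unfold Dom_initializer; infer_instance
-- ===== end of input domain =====

-- B replaces A's bin-slice / per-char loop / front-insertion padding pipeline with one
-- comprehension that zero-pads via format(n,'032b'); objective: simpler.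

-- ===== PORT A =====

-- int(b) for a one-char string b; Pre_ excludes the inputs where Python raises ValueError here
def pyIntChar (b : Char) : Int := (PySem.Int.ofStr? (String.mk [b])).getD 0

-- fillZeros(bits, length, 'BE'): while len(bits) < length: bits.insert(0, 0)
def fillZerosBE (bits : List Int) (length : Nat) : List Int :=
  if bits.length < length then fillZerosBE (0 :: bits) length else bits
termination_by length - bits.length
decreasing_by simp_all; omega

def initializer (vals : List String) : List (List Int) :=
  -- binaries = [bin(int(v, 16))[2:] for v in vals]   (getD 0: Pre_ excludes the ValueError inputs)
  let binaries := vals.map (fun v =>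
    ((PySem.Int.pyBin ((PySem.Int.ofStrBase? v 16).getD 0)).toList).drop 2)
  -- words = []; for binary in binaries: word = []; for b in binary: word.append(int(b)); words.append(fillZeros(word, 32, 'BE'))
  binaries.foldl (fun words binary =>
    words ++ [fillZerosBE (binary.foldl (fun word b => word ++ [pyIntChar b]) []) 32]) []

-- ===== PORT B =====

def initializer_alt (vals : List String) : List (List Int) :=
  vals.map (fun v =>
    let n := (PySem.Int.ofStrBase? v 16).getD 0
    -- format(n, '032b'): binary digits left-padded with '0' to minimum width 32 (exact for n ≥ 0; Pre_ excludes n < 0)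
    let s := List.replicate (32 - (PySem.Int.toBinChars n).length) '0' ++ PySem.Int.toBinChars n
    s.map pyIntChar)

-- ===== PRECONDITION & SPEC =====
-- Pre_: every v parses as a NONNEGATIVE int(v, 16); otherwise Python A raises ValueError
-- (bad hex literal, or '-…' whose bin() string leaves a '-'/'b' char that int() rejects).
def Pre_initializer (vals : List String) : Prop :=
  (vals.all (fun v => ((PySem.Int.ofStrBase? v 16).map (fun n => decide (0 ≤ n))).getD false)) = true
instance (vals : List String) : Decidable (Pre_initializer vals) := by unfold Pre_initializer; infer_instance

def pvWitness_initializer : List String := (["1A", "ff", "0"])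

def Spec_initializer (vals : List String) (out : List (List Int)) : Prop := out = initializer_alt vals
instance (vals : List String) (out : List (List Int)) : Decidable (Spec_initializer vals out) := by unfold Spec_initializer; infer_instance

-- ===== CLAIM (what is proved, stated in full; the proofs are below) =====
def Claim_equal_initializer : Prop := ∀ (vals : List String), Dom_initializer vals → Pre_initializer vals → Spec_initializer vals (initializer vals)

-- ===== LEMMAS AND PROOFS =====

theorem foldl_push {α β : Type} (g : α → β) (l : List α) (a : List β) :
    l.foldl (fun acc x => acc ++ [g x]) a = a ++ l.map g := by
  induction l generalizing a with
  | nil => simp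
  | cons x xs ih => simp [List.foldl, ih]

theorem fillZerosBE_eq (bits : List Int) (L : Nat) :
    fillZerosBE bits L = List.replicate (L - bits.length) 0 ++ bits := by
  fun_induction fillZerosBE bits L with
  | case1 bits h ih =>
      rw [ih]
      have : L - bits.length = (L - (0 :: bits).length) + 1 := by simp at h ⊢; omega
      rw [this, List.replicate_succ']
      simp
  | case2 bits h =>
      have : L - bits.length = 0 := by simp at h; omega
      simp [this]

theorem initializer_elem (v : String) (n : Int) (h : PySem.Int.ofStrBase? v 16 = some n) (hn : 0 ≤ n) :
    fillZerosBE
      ((((PySem.Int.pyBin ((PySem.Int.ofStrBase? v 16).getD 0)).toList).drop 2).foldl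
        (fun word b => word ++ [pyIntChar b]) []) 32 =
    (let m := (PySem.Int.ofStrBase? v 16).getD 0
     (List.replicate (32 - (PySem.Int.toBinChars m).length) '0' ++ PySem.Int.toBinChars m).map pyIntChar) := by
  simp only [h, Option.getD_some]
  rw [foldl_push, PySem.Int.toList_pyBin, fillZerosBE_eq]
  have hneg : ¬ n < 0 := by omega
  simp [PySem.Int.toBinChars0b, PySem.Int.toBinChars, hneg, List.map_replicate]
  have h0 : pyIntChar '0' = 0 := by decide
  simp [h0]

-- ===== VERDICT (by name: the statement is the Claim_ definition above) =====
theorem initializer_spec : Claim_equal_initializer := by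
  intro vals _ hpre
  unfold Spec_initializer initializer initializer_alt
  simp only []
  rw [foldl_push, List.map_map]
  apply List.map_congr_left
  intro v hv
  unfold Pre_initializer at hpre
  rw [List.all_eq_true] at hpre
  have := hpre v hv
  cases hcase : PySem.Int.ofStrBase? v 16 with
  | none => simp [hcase] at this
  | some n =>
      simp only [hcase, Option.map_some, Option.getD_some, decide_eq_true_eq] at this
      simpa [hcase, Function.comp] using initializer_elem v n hcase this
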